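-- pv_equiv track=rewrite | github.com/raffchen/inventory | backend/app/tests/test_inventory_lenses_api.py | compare_returned_json
-- ===== SOURCE A (Python) =====
-- def compare_returned_json(
--     resp_dict: dict,
--     source_dict: dict,
--     ignored: list[str] = ["created_at", "updated_at", "deleted_at"],
-- ) -> bool:
--     # remove ignored fields
--     d1 = {k: v for k, v in resp_dict.items() if k not in ignored}
--     d2 = {k: v for k, v in source_dict.items() if k not in ignored}
--     return d1 == d2
-- ===== SOURCE B (Python) =====
-- def compare_returned_json(
--     resp_dict: dict,
--     source_dict: dict,
--     ignored: list[str] = ["created_at", "updated_at", "deleted_at"],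
-- ) -> bool:
--     # canonicalise: each dict becomes its non-ignored (key, value) items sorted by key;
--     # two dicts agree outside `ignored` iff their canonical forms are the same list
--     canon1 = sorted(((k, v) for k, v in resp_dict.items() if k not in ignored),
--                     key=lambda p: p[0])
--     canon2 = sorted(((k, v) for k, v in source_dict.items() if k not in ignored),
--                     key=lambda p: p[0])
--     return canon1 == canon2
-- ===== Notes on version B (the rewrite author's own statement) =====
-- stated objective: alternative
-- what changed: A builds two filtered dicts and relies on dict equality; B reduces each dict to a canonical form -- its non-ignored items sorted by key -- and compares the two sorted lists, trading unordered dict comparison for sort-then-compare.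
import Mathlib
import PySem

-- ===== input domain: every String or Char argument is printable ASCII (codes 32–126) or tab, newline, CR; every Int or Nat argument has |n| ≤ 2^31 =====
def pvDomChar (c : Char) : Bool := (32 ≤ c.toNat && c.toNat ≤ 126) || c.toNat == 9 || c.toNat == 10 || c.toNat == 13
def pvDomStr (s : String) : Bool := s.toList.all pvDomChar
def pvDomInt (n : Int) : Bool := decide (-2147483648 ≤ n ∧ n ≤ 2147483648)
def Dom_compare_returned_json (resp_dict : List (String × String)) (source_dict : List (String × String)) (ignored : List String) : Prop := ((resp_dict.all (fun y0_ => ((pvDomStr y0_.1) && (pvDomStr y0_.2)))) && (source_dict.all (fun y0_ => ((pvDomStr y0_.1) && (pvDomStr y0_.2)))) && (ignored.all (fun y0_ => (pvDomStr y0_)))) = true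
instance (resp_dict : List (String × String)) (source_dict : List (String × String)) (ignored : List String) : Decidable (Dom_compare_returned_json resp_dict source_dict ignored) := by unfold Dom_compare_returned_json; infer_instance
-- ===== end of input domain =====

-- B replaces A's "build two filtered dicts and compare with ==" by a canonical form:
-- each dict's non-ignored items sorted by key, compared as plain lists.

-- ===== PORT A =====
-- Python's `d1 == d2` on dicts ignores insertion order: exact for dicts (unique keys)
-- as "same size and every item of d1 is found in d2".
def pyDictEq (d1 d2 : PySem.Dict String String) : Bool :=
  (d1.size == d2.size) && d1.items.all (fun p => d2.get? p.1 == some p.2)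

def compare_returned_json (resp_dict : List (String × String)) (source_dict : List (String × String)) (ignored : List String) : Bool :=
  let d1 := PySem.Dict.ofList (resp_dict.filter (fun p => !(ignored.contains p.1)))
  let d2 := PySem.Dict.ofList (source_dict.filter (fun p => !(ignored.contains p.1)))
  pyDictEq d1 d2

-- ===== PORT B =====
def compare_returned_json_alt (resp_dict : List (String × String)) (source_dict : List (String × String)) (ignored : List String) : Bool :=
  let canon1 := PySem.List.sorted (resp_dict.filter (fun p => !(ignored.contains p.1))) (fun p => p.1) false
  let canon2 := PySem.List.sorted (source_dict.filter (fun p => !(ignored.contains p.1))) (fun p => p.1) false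
  canon1 == canon2

-- ===== PRECONDITION & SPEC =====
-- The dict arguments are association lists standing for Python dicts, whose keys are
-- unique; a list with duplicate keys corresponds to no Python input, so Pre_ requires
-- unique keys (it excludes no input the Python function accepts).
def Pre_compare_returned_json (resp_dict : List (String × String)) (source_dict : List (String × String)) (ignored : List String) : Prop :=
  (resp_dict.map Prod.fst).Nodup ∧ (source_dict.map Prod.fst).Nodup

instance (resp_dict : List (String × String)) (source_dict : List (String × String)) (ignored : List String) : Decidable (Pre_compare_returned_json resp_dict source_dict ignored) := by unfold Pre_compare_returned_json; infer_instance

def pvWitness_compare_returned_json : (List (String × String)) × (List (String × String)) × List String :=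
  ([("id", "1"), ("name", "x")], [("name", "x"), ("id", "1")], ["created_at"])

def Spec_compare_returned_json (resp_dict : List (String × String)) (source_dict : List (String × String)) (ignored : List String) (out : Bool) : Prop := out = compare_returned_json_alt resp_dict source_dict ignored
instance (resp_dict : List (String × String)) (source_dict : List (String × String)) (ignored : List String) (out : Bool) : Decidable (Spec_compare_returned_json resp_dict source_dict ignored out) := by unfold Spec_compare_returned_json; infer_instance

-- ===== CLAIM (what is proved, stated in full; the proofs are below) =====
def Claim_equal_compare_returned_json : Prop := ∀ (resp_dict : List (String × String)) (source_dict : List (String × String)) (ignored : List String), Dom_compare_returned_json resp_dict source_dict ignored → Pre_compare_returned_json resp_dict source_dict ignored → Spec_compare_returned_json resp_dict source_dict ignored (compare_returned_json resp_dict source_dict ignored)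

-- ===== LEMMAS AND PROOFS =====

theorem ofList_filter_items (l : List (String × String)) (q : String × String → Bool)
    (h : (l.map Prod.fst).Nodup) :
    PySem.Dict.ofList (l.filter q) = PySem.Dict.mk (l.filter q) := by
  have hnd : ((l.filter q).map Prod.fst).Nodup :=
    h.sublist (List.Sublist.map Prod.fst (List.filter_sublist (l := l)))
  apply PySem.Dict.ext
  have := PySem.Dict.items_foldl_insert_fresh (l.filter q) Prod.fst Prod.snd PySem.Dict.empty
    (fun a _ => by simp [PySem.Dict.contains_empty]) hnd
  simpa [PySem.Dict.ofList, PySem.Dict.update, PySem.Dict.empty] using this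

-- with unique keys, each item is what lookup returns
theorem get?_mk_of_mem (l : List (String × String)) (p : String × String)
    (hp : p ∈ l) (hn : (l.map Prod.fst).Nodup) :
    (PySem.Dict.mk l).get? p.1 = some p.2 :=
  PySem.Dict.get?_of_mem_items (d := PySem.Dict.mk l) hp
    (by simpa [PySem.Dict.keys_mk] using hn)

-- a key with some value in a dict is among its keys
theorem mem_of_get?_some (l : List (String × String)) (k : String) (v : String)
    (h : (PySem.Dict.mk l).get? k = some v) : k ∈ l.map Prod.fst := by
  simp only [PySem.Dict.get?, Option.map_eq_some_iff] at h
  obtain ⟨p, hp, -⟩ := h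
  have hmem := List.mem_of_find?_eq_some hp
  have hpk := List.find?_some hp
  simp only [beq_iff_eq] at hpk
  exact hpk ▸ List.mem_map_of_mem hmem

-- with unique keys, a successful lookup means the pair itself is in the list
theorem pair_mem_of_get?_some (l : List (String × String)) (k v : String)
    (hn : (l.map Prod.fst).Nodup)
    (h : (PySem.Dict.mk l).get? k = some v) : (k, v) ∈ l := by
  have hk := mem_of_get?_some l k v h
  obtain ⟨q, hq, hqk⟩ := List.mem_map.mp hk
  have := get?_mk_of_mem l q hq hn
  rw [hqk, h] at this
  have hv : v = q.2 := by injection this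
  have : (k, v) = q := by rw [hv, ← hqk]
  exact this ▸ hq

-- pyDictEq on nodup-keyed association lists is exactly permutation of the item lists
theorem pyDictEq_iff_perm (f1 f2 : List (String × String))
    (h1 : (f1.map Prod.fst).Nodup) (h2 : (f2.map Prod.fst).Nodup) :
    pyDictEq (PySem.Dict.mk f1) (PySem.Dict.mk f2) = true ↔ f1.Perm f2 := by
  simp only [pyDictEq, Bool.and_eq_true, beq_iff_eq, List.all_eq_true, PySem.Dict.size]
  constructor
  · rintro ⟨hsz, hall⟩
    have hsub : f1 ⊆ f2 := by
      intro p hp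
      exact pair_mem_of_get?_some f2 p.1 p.2 h2 (hall p hp)
    have hnf1 : f1.Nodup := h1.of_map
    exact (hnf1.subperm hsub).perm_of_length_le (by simpa using hsz.ge)
  · intro hperm
    exact ⟨by simpa using hperm.length_eq,
      fun p hp => get?_mk_of_mem f2 p (hperm.mem_iff.mp hp) h2⟩
-- the sorted canonical forms are equal iff the item lists are permutations
theorem sorted_eq_iff_perm (f1 f2 : List (String × String))
    (h1 : (f1.map Prod.fst).Nodup) :
    (PySem.List.sorted f1 (fun p => p.1) false = PySem.List.sorted f2 (fun p => p.1) false)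
      ↔ f1.Perm f2 := by
  constructor
  · intro he
    have p2 := PySem.List.sorted_perm f2 (fun p => p.1) false
    rw [← he] at p2
    exact (PySem.List.sorted_perm f1 (fun p => p.1) false).symm.trans p2
  · intro hperm
    -- sorted f1 is a strictly key-increasing rearrangement of f2
    have hps : (PySem.List.sorted f1 (fun p => p.1) false).Pairwise (fun a b => a.1 ≤ b.1) :=
      PySem.List.sorted_pairwise ..
    have hnds : ((PySem.List.sorted f1 (fun p => p.1) false).map Prod.fst).Nodup :=
      (((PySem.List.sorted_perm f1 (fun p => p.1) false).map Prod.fst).nodup_iff).mpr h1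
    have hne : (PySem.List.sorted f1 (fun p => p.1) false).Pairwise (fun a b => a.1 ≠ b.1) :=
      (List.pairwise_map).mp hnds
    have hlt : (PySem.List.sorted f1 (fun p => p.1) false).Pairwise (fun a b => a.1 < b.1) :=
      (hps.and hne).imp (fun h => lt_of_le_of_ne h.1 h.2)
    have hp2 : (PySem.List.sorted f1 (fun p => p.1) false).Perm f2 :=
      (PySem.List.sorted_perm ..).trans hperm
    exact (PySem.List.sorted_eq_of_perm_of_pairwise_lt f2 (PySem.List.sorted f1 (fun p => p.1) false) (fun p => p.1) hp2 hlt).symm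

-- ===== VERDICT (by name: the statement is the Claim_ definition above) =====
theorem compare_returned_json_spec : Claim_equal_compare_returned_json := by
  intro resp source ignored _ hpre
  obtain ⟨h1, h2⟩ := hpre
  unfold Spec_compare_returned_json compare_returned_json compare_returned_json_alt
  simp only
  rw [ofList_filter_items resp _ h1, ofList_filter_items source _ h2]
  have hnf1 : ((resp.filter (fun p => !(ignored.contains p.1))).map Prod.fst).Nodup :=
    h1.sublist (List.Sublist.map Prod.fst (List.filter_sublist (l := resp)))
  have hnf2 : ((source.filter (fun p => !(ignored.contains p.1))).map Prod.fst).Nodup :=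
    h2.sublist (List.Sublist.map Prod.fst (List.filter_sublist (l := source)))
  rw [Bool.eq_iff_iff, pyDictEq_iff_perm _ _ hnf1 hnf2, beq_iff_eq,
    sorted_eq_iff_perm _ _ hnf1]
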